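-- pv_equiv track=rewrite | github.com/joshanashakya/dissertation | workspace/dataset/java-python/GeeksForGeeks/2580/A/2.py | sumOfElements
-- ===== SOURCE A (Python) =====
-- N = 100005
--
-- def SieveOfEratosthenes(composite):
--
--     for p in range(2, N):
--         if p*p > N:
--             break
--
--         # If composite[p] is not changed,
--         # then it is a prime
--         if (composite[p] == False):
--
--             # Update all multiples of p,
--             # set them to composite
--             for i in range(2*p, N, p):
--                 composite[i] = True
--
-- def sumOfElements(arr, n):
--     composite = [False] * N
--
--     SieveOfEratosthenes(composite)
--
--     # Map is used to store
--     # element frequencies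
--     m = dict();
--     for i in range(n):
--         m[arr[i]] = m.get(arr[i], 0) + 1
--
--     # To store sum
--     sum = 0
--
--     # Traverse the map using iterators
--     for it in m:
--
--         # Count the number of elements
--         # having composite frequencies
--         if (composite[m[it]]):
--             sum += (it)
--
--     return sum
-- ===== SOURCE B (Python) =====
-- def _is_composite(f):
--     if f < 4:
--         return False
--     d = 2
--     while d * d <= f:
--         if f % d == 0:
--             return True
--         d += 1
--     return False
--
-- def sumOfElements(arr, n):
--     m = dict()
--     for i in range(n):
--         m[arr[i]] = m.get(arr[i], 0) + 1
--     total = 0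
--     for x, f in m.items():
--         if _is_composite(f):
--             total += x
--     return total
-- ===== Notes on version B (the rewrite author's own statement) =====
-- stated objective: simpler
-- what changed: B drops the 100005-entry Sieve of Eratosthenes table and instead decides compositeness of each distinct element's frequency on demand by trial division up to sqrt(f); the frequency-counting loop is kept identical.
import Mathlib
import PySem

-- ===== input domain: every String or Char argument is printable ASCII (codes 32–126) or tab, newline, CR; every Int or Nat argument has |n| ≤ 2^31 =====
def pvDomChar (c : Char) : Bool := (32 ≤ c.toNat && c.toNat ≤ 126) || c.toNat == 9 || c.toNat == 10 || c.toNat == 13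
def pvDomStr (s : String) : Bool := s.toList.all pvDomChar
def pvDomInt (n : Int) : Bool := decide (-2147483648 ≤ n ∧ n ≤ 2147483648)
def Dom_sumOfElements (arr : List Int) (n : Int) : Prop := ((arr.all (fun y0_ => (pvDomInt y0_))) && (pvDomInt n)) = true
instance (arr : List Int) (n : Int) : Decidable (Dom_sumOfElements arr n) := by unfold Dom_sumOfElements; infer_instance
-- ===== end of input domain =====

-- B replaces A's 100005-entry sieve table by on-demand trial division of each distinct
-- element's frequency (objective: simpler); the frequency-counting loop is unchanged.

-- ===== PORT A =====
-- Python's list 'composite' is ported as Array Bool; the write 'composite[i] = True' uses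
-- setIfInBounds (the sieve only writes indices 2p..100004, always in bounds) and the reads
-- 'composite[p]' / 'composite[m[it]]' use getD at .toNat (the index is drawn from
-- range(2, N) resp. is a frequency ≥ 1, so it is never negative).

def pvSieveMark (c : Array Bool) (p : Int) : Array Bool :=
  (PySem.List.pyRange (2*p) 100005 p).foldl (fun c i => c.setIfInBounds i.toNat true) c

def pvSieveLoop (c : Array Bool) (ps : List Int) : Array Bool :=
  match ps with
  | [] => c
  | p :: rest =>
    if p * p > 100005 then c
    else if c.getD p.toNat true = false then pvSieveLoop (pvSieveMark c p) rest
    else pvSieveLoop c rest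

def pvSieveOfEratosthenes (c : Array Bool) : Array Bool :=
  pvSieveLoop c (PySem.List.pyRange 2 100005 1)

def sumOfElements (arr : List Int) (n : Int) : Int :=
  let composite := pvSieveOfEratosthenes (Array.replicate 100005 false)
  let m := (PySem.List.pyRange 0 n 1).foldl
    (fun d i => d.insert (PySem.List.pyGetD arr i 0) (d.getD (PySem.List.pyGetD arr i 0) 0 + 1))
    (PySem.Dict.empty : PySem.Dict Int Int)
  (PySem.Dict.keys m).foldl
    (fun s it => if composite.getD (m.getD it 0).toNat false then s + it else s) 0

-- ===== PORT B =====
def pvTrialDiv (f : Int) (d : Nat) : Bool :=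
  if h : (d : Int) * d ≤ f then
    (if PySem.Int.mod f d = 0 then true else pvTrialDiv f (d+1))
  else false
termination_by f.toNat + 1 - d
decreasing_by
  have h1 : (d : Int) ≤ (d : Int) * d := by nlinarith [Int.natCast_nonneg d]
  have h2 : (d : Int) ≤ f := le_trans h1 h
  omega

def pvIsComposite (f : Int) : Bool :=
  if f < 4 then false else pvTrialDiv f 2

def sumOfElements_alt (arr : List Int) (n : Int) : Int :=
  let m := (PySem.List.pyRange 0 n 1).foldl
    (fun d i => d.insert (PySem.List.pyGetD arr i 0) (d.getD (PySem.List.pyGetD arr i 0) 0 + 1))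
    (PySem.Dict.empty : PySem.Dict Int Int)
  (PySem.Dict.items m).foldl
    (fun s kv => if pvIsComposite kv.2 then s + kv.1 else s) 0

-- ===== PRECONDITION & SPEC =====
-- Pre_ excludes exactly the inputs on which A raises IndexError: n beyond len(arr)
-- (reading arr[i]), or some element of the scanned prefix occurring ≥ 100005 times
-- (its frequency would overrun the sieve table 'composite').
def Pre_sumOfElements (arr : List Int) (n : Int) : Prop :=
  n ≤ (arr.length : Int) ∧
  ∀ x ∈ arr.take n.toNat, ((arr.take n.toNat).count x : Int) < 100005
instance (arr : List Int) (n : Int) : Decidable (Pre_sumOfElements arr n) := by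
  unfold Pre_sumOfElements; infer_instance

def pvWitness_sumOfElements : List Int × Int := ([2, 2, 2, 2, 5], 5)

def Spec_sumOfElements (arr : List Int) (n : Int) (out : Int) : Prop := out = sumOfElements_alt arr n
instance (arr : List Int) (n : Int) (out : Int) : Decidable (Spec_sumOfElements arr n out) := by unfold Spec_sumOfElements; infer_instance

-- ===== CLAIM (what is proved, stated in full; the proofs are below) =====
def Claim_equal_sumOfElements : Prop := ∀ (arr : List Int) (n : Int), Dom_sumOfElements arr n → Pre_sumOfElements arr n → Spec_sumOfElements arr n (sumOfElements arr n)

-- ===== LEMMAS AND PROOFS =====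

-- 'k is composite'
def pvCompN (k : Nat) : Prop := 2 ≤ k ∧ ¬ Nat.Prime k

-- a composite number has a prime factor q with q ∣ k, 2*q ≤ k and q*q ≤ k
lemma pvMinFac_facts (k : Nat) (h2 : 2 ≤ k) (hnp : ¬ Nat.Prime k) :
    Nat.Prime k.minFac ∧ k.minFac ∣ k ∧ 2 * k.minFac ≤ k ∧ k.minFac * k.minFac ≤ k := by
  have hne1 : k ≠ 1 := by omega
  have hp : Nat.Prime k.minFac := Nat.minFac_prime hne1
  have hdvd : k.minFac ∣ k := Nat.minFac_dvd k
  have hsq : k.minFac * k.minFac ≤ k := by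
    have := Nat.minFac_sq_le_self (by omega : 0 < k) hnp
    nlinarith [this]
  have h2q : 2 * k.minFac ≤ k := by
    have hq2 : 2 ≤ k.minFac := hp.two_le
    obtain ⟨m, hm⟩ := hdvd
    have hm1 : m ≠ 1 := by rintro rfl; rw [Nat.mul_one] at hm; exact hnp (hm ▸ hp)
    have hm0 : m ≠ 0 := by rintro rfl; omega
    have h2m : 2 ≤ m := by omega
    nlinarith
  exact ⟨hp, hdvd, h2q, hsq⟩

-- a number with a prime factor q, q ∣ k, 2*q ≤ k, is composite
lemma pvCompN_of_factor (k q : Nat) (hq : Nat.Prime q) (hdvd : q ∣ k) (h2q : 2 * q ≤ k) :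
    pvCompN k := by
  have hq2 : 2 ≤ q := hq.two_le
  refine ⟨by omega, fun hk => ?_⟩
  rcases (hk.eq_one_or_self_of_dvd q hdvd) with h | h <;> omega

-- === sieve array lemmas ===

lemma pvFoldl_set_size (l : List Int) (c : Array Bool) :
    (l.foldl (fun c i => c.setIfInBounds i.toNat true) c).size = c.size := by
  induction l generalizing c with
  | nil => rfl
  | cons i l ih => simp [List.foldl_cons, ih, Array.size_setIfInBounds]

lemma pvFoldl_set_getD (l : List Int) (c : Array Bool) (k : Nat) (hk : k < c.size) :
    (l.foldl (fun c i => c.setIfInBounds i.toNat true) c).getD k false =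
      (c.getD k false || l.any (fun i => i.toNat == k)) := by
  induction l generalizing c with
  | nil => simp
  | cons i l ih =>
    rw [List.foldl_cons, ih _ (by simpa [Array.size_setIfInBounds] using hk)]
    have hgd : ∀ (a : Array Bool) (hj : k < a.size), a.getD k false = a[k] := by
      intro a hj; simp [Array.getD, hj]
    rw [hgd _ (by simpa [Array.size_setIfInBounds] using hk), hgd _ hk,
        Array.getElem_setIfInBounds hk]
    by_cases h : i.toNat = k
    · simp [h]
    · have hb : (i.toNat == k) = false := by simp [h]
      simp [h, hb]

lemma pvSieveMark_size (c : Array Bool) (p : Int) : (pvSieveMark c p).size = c.size :=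
  pvFoldl_set_size _ c

lemma pvSieveMark_getD (c : Array Bool) (p : Nat) (hp : 1 ≤ p) (hsz : c.size = 100005)
    (k : Nat) (hk : k < 100005) :
    (pvSieveMark c (p:Int)).getD k false =
      (c.getD k false || decide (p ∣ k ∧ 2*p ≤ k)) := by
  rw [pvSieveMark, pvFoldl_set_getD _ c k (by omega)]
  congr 1
  rw [Bool.eq_iff_iff, List.any_eq_true, decide_eq_true_eq]
  constructor
  · rintro ⟨i, hi, hik⟩
    rw [PySem.List.mem_pyRange_iff_of_pos (by exact_mod_cast hp)] at hi
    obtain ⟨hlo, hhi, hdvd⟩ := hi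
    have hipos : (0:Int) ≤ i := by omega
    have hik' : i = (k : Int) := by
      rw [beq_iff_eq] at hik; omega
    subst hik'
    obtain ⟨t, ht⟩ := hdvd
    constructor
    · have : (k : Int) = (p : Int) * (t + 2) := by linarith [ht]
      have hdk : (p:Int) ∣ (k:Int) := ⟨t + 2, this⟩
      exact_mod_cast hdk
    · omega
  · rintro ⟨hdvd, h2p⟩
    refine ⟨(k : Int), ?_, by simp⟩
    rw [PySem.List.mem_pyRange_iff_of_pos (by exact_mod_cast hp)]
    obtain ⟨t, ht⟩ := hdvd
    refine ⟨by exact_mod_cast h2p, by exact_mod_cast hk, ⟨(t:Int) - 2, ?_⟩⟩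
    have : (k : Int) = (p : Int) * t := by exact_mod_cast ht
    linarith [this]

-- the sieve invariant after having processed all p < P
def pvGood (c : Array Bool) (P : Nat) : Prop :=
  c.size = 100005 ∧ ∀ k : Nat, k < 100005 →
    (c.getD k false = true ↔ ∃ q : Nat, Nat.Prime q ∧ q < P ∧ q ∣ k ∧ 2*q ≤ k)

lemma pvGood_final (c : Array Bool) (P : Nat) (hP : 317 ≤ P) (hg : pvGood c P) :
    ∀ k : Nat, k < 100005 → (c.getD k false = true ↔ pvCompN k) := by
  intro k hk
  rw [hg.2 k hk]
  constructor
  · rintro ⟨q, hq, _, hdvd, h2q⟩; exact pvCompN_of_factor k q hq hdvd h2q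
  · rintro ⟨h2, hnp⟩
    obtain ⟨hp, hdvd, h2q, hsq⟩ := pvMinFac_facts k h2 hnp
    refine ⟨k.minFac, hp, ?_, hdvd, h2q⟩
    nlinarith

lemma pvSieveLoop_char : ∀ (t P : Nat), 2 ≤ P → P + t = 100006 → ∀ c, pvGood c P →
    ∀ k : Nat, k < 100005 →
      ((pvSieveLoop c (PySem.List.pyRange (P:Int) 100005 1)).getD k false = true ↔ pvCompN k) := by
  intro t
  induction t with
  | zero =>
    intro P h2 hPt c hg k hk
    rw [PySem.List.pyRange_one_eq_nil (by exact_mod_cast (by omega : (100005:Nat) ≤ P))]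
    exact pvGood_final c P (by omega) hg k hk
  | succ t ih =>
    intro P h2 hPt c hg k hk
    by_cases hbig : 317 ≤ P
    · by_cases hend : 100005 ≤ P
      · rw [PySem.List.pyRange_one_eq_nil (by exact_mod_cast hend)]
        exact pvGood_final c P hbig hg k hk
      · rw [PySem.List.pyRange_one_cons (by exact_mod_cast (by omega : P < 100005))]
        have hpp : ((P:Int) * (P:Int) > 100005) := by
          have : (317:Int) ≤ (P:Int) := by exact_mod_cast hbig
          nlinarith
        rw [pvSieveLoop, if_pos hpp]
        exact pvGood_final c P hbig hg k hk
    · push Not at hbig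
      have hPk : P < 100005 := by omega
      rw [PySem.List.pyRange_one_cons (by exact_mod_cast hPk)]
      rw [pvSieveLoop]
      have hnb : ¬ ((P:Int) * (P:Int) > 100005) := by
        have : (P:Int) ≤ 316 := by exact_mod_cast (by omega : P ≤ 316)
        nlinarith
      rw [if_neg hnb]
      have hsz := hg.1
      have hread : (c.getD ((P:Int)).toNat true) = c.getD P false := by
        have hPsz : P < c.size := by omega
        simp [Array.getD, hPsz]
      have hcast : ((P:Int) + 1) = (((P+1 : Nat)):Int) := by push_cast; ring
      by_cases hcp : c.getD P false = false
      · rw [if_pos (by rw [hread]; exact hcp)]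
        have hPprime : Nat.Prime P := by
          by_contra hnp
          obtain ⟨hp, hdvd, h2q, _⟩ := pvMinFac_facts P h2 hnp
          have hlt : P.minFac < P := by
            obtain ⟨hq2, _⟩ := And.intro hp.two_le hdvd
            omega
          have : c.getD P false = true := (hg.2 P hPk).2 ⟨P.minFac, hp, hlt, hdvd, h2q⟩
          rw [hcp] at this; exact Bool.false_ne_true this
        have hg' : pvGood (pvSieveMark c (P:Int)) (P+1) := by
          refine ⟨by rw [pvSieveMark_size]; exact hsz, ?_⟩
          intro j hj
          rw [pvSieveMark_getD c P (by omega) hsz j hj, Bool.or_eq_true, hg.2 j hj,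
              decide_eq_true_eq]
          constructor
          · rintro (⟨q, hq, hlt, hd, h2'⟩ | ⟨hd, h2'⟩)
            · exact ⟨q, hq, by omega, hd, h2'⟩
            · exact ⟨P, hPprime, by omega, hd, h2'⟩
          · rintro ⟨q, hq, hlt, hd, h2'⟩
            by_cases hqP : q = P
            · subst hqP; exact Or.inr ⟨hd, h2'⟩
            · exact Or.inl ⟨q, hq, by omega, hd, h2'⟩
        have := ih (P+1) (by omega) (by omega) _ hg' k hk
        rw [hcast]
        exact this
      · rw [if_neg (by rw [hread]; exact hcp)]
        have htrue : c.getD P false = true := by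
          revert hcp; cases (c.getD P false) <;> simp
        have hPnp : ¬ Nat.Prime P := by
          obtain ⟨q, hq, hlt, hd, h2'⟩ := (hg.2 P hPk).1 htrue
          intro hp
          rcases hp.eq_one_or_self_of_dvd q hd with h | h
          · exact absurd hq.two_le (by omega)
          · omega
        have hg' : pvGood c (P+1) := by
          refine ⟨hsz, ?_⟩
          intro j hj
          rw [hg.2 j hj]
          constructor
          · rintro ⟨q, hq, hlt, hd, h2'⟩; exact ⟨q, hq, by omega, hd, h2'⟩
          · rintro ⟨q, hq, hlt, hd, h2'⟩
            by_cases hqP : q = P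
            · subst hqP; exact absurd hq hPnp
            · exact ⟨q, hq, by omega, hd, h2'⟩
        have := ih (P+1) (by omega) (by omega) c hg' k hk
        rw [hcast]
        exact this

lemma pvSieve_char :
    ∀ k : Nat, k < 100005 →
      ((pvSieveOfEratosthenes (Array.replicate 100005 false)).getD k false = true ↔ pvCompN k) := by
  intro k hk
  have hinit : pvGood (Array.replicate 100005 false) 2 := by
    refine ⟨by simp, ?_⟩
    intro j hj
    constructor
    · intro h; exfalso; revert h; simp [Array.getD, hj]
    · rintro ⟨q, hq, hlt, _, _⟩; exact absurd hq.two_le (by omega)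
  exact pvSieveLoop_char 100004 2 (by omega) (by omega) _ hinit k hk

-- === trial-division lemmas ===

lemma pvTrialDiv_iff (f : Int) (hf : 0 ≤ f) :
    ∀ (m d : Nat), f.toNat + 1 - d ≤ m →
      (pvTrialDiv f d = true ↔ ∃ e : Nat, d ≤ e ∧ (e:Int) * e ≤ f ∧ (e:Int) ∣ f) := by
  intro m
  induction m with
  | zero =>
    intro d hd
    rw [pvTrialDiv]
    have hdf : f < (d:Int) := by omega
    have hcond : ¬ ((d:Int) * d ≤ f) := by nlinarith [Int.natCast_nonneg d]
    rw [dif_neg hcond]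
    refine iff_of_false (by simp) ?_
    rintro ⟨e, he, hee, _⟩
    have hde : (d:Int) ≤ (e:Int) := by exact_mod_cast he
    nlinarith [Int.natCast_nonneg d]
  | succ m ih =>
    intro d hd
    rw [pvTrialDiv]
    by_cases hcond : (d:Int) * d ≤ f
    · rw [dif_pos hcond]
      by_cases hmod : PySem.Int.mod f d = 0
      · rw [if_pos hmod]
        have hdvd : (d:Int) ∣ f := (PySem.Int.mod_eq_zero_iff_dvd f d).1 hmod
        exact iff_of_true rfl ⟨d, le_refl d, hcond, hdvd⟩
      · rw [if_neg hmod]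
        have hle : (d:Int) ≤ f := le_trans (by nlinarith [Int.natCast_nonneg d]) hcond
        rw [ih (d+1) (by omega)]
        constructor
        · rintro ⟨e, he, h1, h2⟩; exact ⟨e, by omega, h1, h2⟩
        · rintro ⟨e, he, h1, h2⟩
          by_cases hed : e = d
          · subst hed
            exact absurd ((PySem.Int.mod_eq_zero_iff_dvd f e).2 h2) hmod
          · exact ⟨e, by omega, h1, h2⟩
    · rw [dif_neg hcond]
      refine iff_of_false (by simp) ?_
      rintro ⟨e, he, h1, _⟩
      have hde : (d:Int) ≤ (e:Int) := by exact_mod_cast he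
      exact hcond (by nlinarith [Int.natCast_nonneg d])

lemma pvIsComposite_iff (f : Nat) : pvIsComposite (f:Int) = true ↔ pvCompN f := by
  by_cases h4 : (f:Int) < 4
  · rw [pvIsComposite, if_pos h4]
    have hf4 : f < 4 := by exact_mod_cast h4
    refine iff_of_false (by simp) ?_
    rintro ⟨h2, hnp⟩
    interval_cases f
    · exact hnp Nat.prime_two
    · exact hnp Nat.prime_three
  · rw [pvIsComposite, if_neg h4]
    have hf : 4 ≤ f := by
      by_contra h
      exact h4 (by exact_mod_cast (by omega : f < 4))
    rw [pvTrialDiv_iff (f:Int) (by positivity) f 2 (by omega)]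
    constructor
    · rintro ⟨e, he2, hee, hdvd⟩
      have hdvd' : e ∣ f := by exact_mod_cast hdvd
      have hee' : e * e ≤ f := by exact_mod_cast hee
      refine ⟨by omega, fun hp => ?_⟩
      rcases hp.eq_one_or_self_of_dvd e hdvd' with h | h
      · omega
      · subst h; nlinarith
    · rintro ⟨h2, hnp⟩
      obtain ⟨hp, hdvd, _, hsq⟩ := pvMinFac_facts f h2 hnp
      exact ⟨f.minFac, hp.two_le, by exact_mod_cast hsq, by exact_mod_cast hdvd⟩

-- the bridge: sieve table lookup = trial division, for 1 ≤ f < 100005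
lemma pvBridge (f : Nat) (h2 : f < 100005) :
    (pvSieveOfEratosthenes (Array.replicate 100005 false)).getD f false = pvIsComposite (f:Int) := by
  rw [Bool.eq_iff_iff, pvSieve_char f h2, pvIsComposite_iff]

-- === counting loop: the dict both programs build is counter of the scanned prefix ===

lemma pvDict_eq_counter (arr : List Int) (n : Int) (hn : n ≤ (arr.length : Int)) :
    (PySem.List.pyRange 0 n 1).foldl
      (fun d i => d.insert (PySem.List.pyGetD arr i 0) (d.getD (PySem.List.pyGetD arr i 0) 0 + 1))
      (PySem.Dict.empty : PySem.Dict Int Int) = PySem.Dict.counter (arr.take n.toNat) := by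
  by_cases hn0 : n ≤ 0
  · rw [PySem.List.pyRange_one_eq_nil hn0, show n.toNat = 0 by omega]
    rfl
  · push Not at hn0
    have hlen : ((arr.take n.toNat).length : Int) = n := by
      simp [List.length_take]; omega
    rw [show PySem.List.pyRange 0 n 1 = PySem.List.pyRange 0 (((arr.take n.toNat).length : Int)) 1
        from by rw [hlen]]
    rw [PySem.List.foldl_congr_mem _ _
      (fun d j => (fun (d : PySem.Dict Int Int) x => d.insert x (d.getD x 0 + 1)) d
        (PySem.List.pyGetD (arr.take n.toNat) j 0)) _ ?_]
    · rw [PySem.List.foldl_pyRange_zero_pyGetD' (arr.take n.toNat) 0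
        (fun (d : PySem.Dict Int Int) x => d.insert x (d.getD x 0 + 1)) PySem.Dict.empty]
      rw [PySem.Dict.foldl_insert_getD_add_one_eq_counter]
    · intro acc j hj
      rw [PySem.List.mem_pyRange_one] at hj
      have hj2 : j < ((arr.take n.toNat).length : Int) := hj.2
      have hjl : j.toNat < (arr.take n.toNat).length := by omega
      have hjl' : j.toNat < arr.length := by
        have := List.length_take_le n.toNat arr
        omega
      have hgd : PySem.List.pyGetD arr j 0 = PySem.List.pyGetD (arr.take n.toNat) j 0 := by
        rw [PySem.List.pyGetD_eq_getElem arr 0 hj.1 (by omega),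
            PySem.List.pyGetD_eq_getElem (arr.take n.toNat) 0 hj.1 (by omega)]
        exact (List.getElem_take).symm
      rw [hgd]

-- ===== VERDICT (by name: the statement is the Claim_ definition above) =====
theorem sumOfElements_spec : Claim_equal_sumOfElements := by
  intro arr n _ hpre
  obtain ⟨hn, hcnt⟩ := hpre
  unfold Spec_sumOfElements
  show sumOfElements arr n = sumOfElements_alt arr n
  simp only [sumOfElements, sumOfElements_alt]
  rw [pvDict_eq_counter arr n hn]
  rw [PySem.Dict.keys_counter, PySem.Dict.items_counter, List.foldl_map]
  apply PySem.List.foldl_congr_mem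
  intro s k hkmem
  have hk_ys : k ∈ arr.take n.toNat := (PySem.Set.mem_ofList _ k).1 hkmem
  have hclt : ((arr.take n.toNat).count k : Int) < 100005 :=
    hcnt k hk_ys
  rw [PySem.Dict.getD_counter, Int.toNat_natCast,
      pvBridge ((arr.take n.toNat).count k) (by exact_mod_cast hclt)]
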